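-- pv_equiv track=rewrite | github.com/himesh9887/Myra-AI | MYRA-AI/engine/conversation_engine.py | _contains_action_intent
-- ===== SOURCE A (Python) =====
-- def _contains_action_intent(normalized: str) -> bool:
--     action_starters = (
--         "open ",
--         "close ",
--         "launch ",
--         "start ",
--         "run ",
--         "play ",
--         "search ",
--         "find ",
--         "google ",
--         "download ",
--         "send ",
--         "call ",
--         "set ",
--         "increase ",
--         "decrease ",
--         "mute ",
--         "restart ",
--         "shutdown ",
--         "lock ",
--         "plan ",
--         "schedule ",
--         "remind ",
--     )
--     return any(normalized.startswith(starter) for starter in action_starters)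
-- ===== SOURCE B (Python) =====
-- # B: tokenize once (partition at the first space) and test the first token
-- # against a precomputed set, instead of 22 startswith scans.
-- COMMANDS = frozenset({
--     "open", "close", "launch", "start", "run", "play", "search", "find",
--     "google", "download", "send", "call", "set", "increase", "decrease",
--     "mute", "restart", "shutdown", "lock", "plan", "schedule", "remind",
-- })
--
-- def _contains_action_intent(normalized: str) -> bool:
--     first, sep, _ = normalized.partition(' ')
--     return sep == ' ' and first in COMMANDS
-- ===== Notes on version B (the rewrite author's own statement) =====
-- stated objective: idiomatic
-- what changed: B splits off the first space-delimited token once (str.partition) and tests it against a precomputed frozenset of command words, instead of A's any() over 22 startswith prefix scans.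
import Mathlib
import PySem

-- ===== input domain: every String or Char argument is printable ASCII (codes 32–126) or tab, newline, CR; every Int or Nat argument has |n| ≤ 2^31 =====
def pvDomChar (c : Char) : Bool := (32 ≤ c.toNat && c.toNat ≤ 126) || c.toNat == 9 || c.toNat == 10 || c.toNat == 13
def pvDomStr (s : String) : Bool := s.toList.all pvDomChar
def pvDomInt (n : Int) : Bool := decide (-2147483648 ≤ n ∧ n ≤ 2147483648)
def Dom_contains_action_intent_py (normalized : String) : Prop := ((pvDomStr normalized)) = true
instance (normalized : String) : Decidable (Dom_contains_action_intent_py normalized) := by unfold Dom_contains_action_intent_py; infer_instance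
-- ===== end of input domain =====

-- B tokenizes once (first token before a space) and looks it up in a precomputed command set,
-- instead of A's any() over 22 startswith prefix scans; objective: idiomatic.


-- ===== PORT A =====
def contains_action_intent_py (normalized : String) : Bool :=
  let action_starters : List String :=
    ["open ", "close ", "launch ", "start ", "run ", "play ", "search ", "find ",
     "google ", "download ", "send ", "call ", "set ", "increase ", "decrease ",
     "mute ", "restart ", "shutdown ", "lock ", "plan ", "schedule ", "remind "]
  action_starters.any (fun starter => PySem.Str.startswith normalized starter)

-- ===== PORT B =====
-- the frozenset COMMANDS (distinct elements, as command words' char lists)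
def pvCOMMANDS : List (List Char) :=
  ["open".toList, "close".toList, "launch".toList, "start".toList, "run".toList,
   "play".toList, "search".toList, "find".toList, "google".toList, "download".toList,
   "send".toList, "call".toList, "set".toList, "increase".toList, "decrease".toList,
   "mute".toList, "restart".toList, "shutdown".toList, "lock".toList, "plan".toList,
   "schedule".toList, "remind".toList]

-- partition(' '): first = chars before the first space; sep found ⟺ the token is a proper prefix
def contains_action_intent_py_alt (normalized : String) : Bool :=
  let l := normalized.toList
  let first := l.takeWhile (fun c => c != ' ')
  decide (first.length < l.length) && pvCOMMANDS.contains first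

-- ===== PRECONDITION & SPEC =====
def Spec_contains_action_intent_py (normalized : String) (out : Bool) : Prop := out = contains_action_intent_py_alt normalized
instance (normalized : String) (out : Bool) : Decidable (Spec_contains_action_intent_py normalized out) := by unfold Spec_contains_action_intent_py; infer_instance

-- ===== CLAIM (what is proved, stated in full; the proofs are below) =====
def Claim_equal_contains_action_intent_py : Prop := ∀ (normalized : String), Dom_contains_action_intent_py normalized → Spec_contains_action_intent_py normalized (contains_action_intent_py normalized)

-- ===== LEMMAS AND PROOFS =====

-- a word-plus-space is a prefix of l iff the word is l's first token and a space follows it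
theorem pv_key (ws : List Char) (h : (' ' : Char) ∉ ws) (l : List Char) :
    ((ws ++ [' ']) <+: l) ↔ (l.takeWhile (fun c => c != ' ') = ws ∧ ws.length < l.length) := by
  induction ws generalizing l with
  | nil =>
    cases l with
    | nil => simp
    | cons c t =>
      by_cases hc : c = ' '
      · subst hc; simp [List.cons_prefix_cons]
      · simp [List.cons_prefix_cons, hc, Ne.symm hc]
  | cons a ws ih =>
    have ha : a ≠ ' ' := fun hEq => h (hEq ▸ List.mem_cons_self)
    have hws : (' ' : Char) ∉ ws := fun hm => h (List.mem_cons_of_mem _ hm)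
    cases l with
    | nil => simp
    | cons c t =>
      by_cases hcsp : c = ' '
      · subst hcsp
        simp [List.cons_prefix_cons, ha]
      · simp only [List.cons_append, List.cons_prefix_cons, List.takeWhile_cons,
          bne_iff_ne, ne_eq, hcsp, not_false_eq_true, if_true, List.length_cons,
          Nat.succ_lt_succ_iff, ih hws t, List.cons.injEq]
        constructor
        · rintro ⟨h1, h2, h3⟩; exact ⟨⟨h1.symm, h2⟩, h3⟩
        · rintro ⟨⟨h1, h2⟩, h3⟩; exact ⟨h1.symm, h2, h3⟩

theorem pv_sw (ws : List Char) (h : (' ' : Char) ∉ ws) (l : List Char) :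
    PySem.Chars.startswith l (ws ++ [' ']) =
      ((l.takeWhile (fun c => c != ' ') == ws) &&
        decide ((l.takeWhile (fun c => c != ' ')).length < l.length)) := by
  rw [Bool.eq_iff_iff]
  simp only [PySem.Chars.startswith_iff, Bool.and_eq_true, beq_iff_eq, decide_eq_true_eq]
  rw [pv_key ws h l]
  constructor <;> (rintro ⟨h1, h2⟩; subst h1; exact ⟨rfl, h2⟩)

theorem pv_beq (a b : List Char) : (a == b) = decide (a = b) := by
  rw [Bool.eq_iff_iff]; simp

-- ===== VERDICT (by name: the statement is the Claim_ definition above) =====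
theorem contains_action_intent_py_spec : Claim_equal_contains_action_intent_py := by
  intro s _
  unfold Spec_contains_action_intent_py contains_action_intent_py contains_action_intent_py_alt
  simp only [List.any_cons, List.any_nil, Bool.or_false, PySem.Str.startswith_eq]
  rw [show ("open " : String).toList = "open".toList ++ [' '] by decide,
      show ("close " : String).toList = "close".toList ++ [' '] by decide,
      show ("launch " : String).toList = "launch".toList ++ [' '] by decide,
      show ("start " : String).toList = "start".toList ++ [' '] by decide,
      show ("run " : String).toList = "run".toList ++ [' '] by decide,
      show ("play " : String).toList = "play".toList ++ [' '] by decide,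
      show ("search " : String).toList = "search".toList ++ [' '] by decide,
      show ("find " : String).toList = "find".toList ++ [' '] by decide,
      show ("google " : String).toList = "google".toList ++ [' '] by decide,
      show ("download " : String).toList = "download".toList ++ [' '] by decide,
      show ("send " : String).toList = "send".toList ++ [' '] by decide,
      show ("call " : String).toList = "call".toList ++ [' '] by decide,
      show ("set " : String).toList = "set".toList ++ [' '] by decide,
      show ("increase " : String).toList = "increase".toList ++ [' '] by decide,
      show ("decrease " : String).toList = "decrease".toList ++ [' '] by decide,
      show ("mute " : String).toList = "mute".toList ++ [' '] by decide,
      show ("restart " : String).toList = "restart".toList ++ [' '] by decide,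
      show ("shutdown " : String).toList = "shutdown".toList ++ [' '] by decide,
      show ("lock " : String).toList = "lock".toList ++ [' '] by decide,
      show ("plan " : String).toList = "plan".toList ++ [' '] by decide,
      show ("schedule " : String).toList = "schedule".toList ++ [' '] by decide,
      show ("remind " : String).toList = "remind".toList ++ [' '] by decide]
  rw [pv_sw _ (by decide) _, pv_sw _ (by decide) _, pv_sw _ (by decide) _,
      pv_sw _ (by decide) _, pv_sw _ (by decide) _, pv_sw _ (by decide) _,
      pv_sw _ (by decide) _, pv_sw _ (by decide) _, pv_sw _ (by decide) _,
      pv_sw _ (by decide) _, pv_sw _ (by decide) _, pv_sw _ (by decide) _,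
      pv_sw _ (by decide) _, pv_sw _ (by decide) _, pv_sw _ (by decide) _,
      pv_sw _ (by decide) _, pv_sw _ (by decide) _, pv_sw _ (by decide) _,
      pv_sw _ (by decide) _, pv_sw _ (by decide) _, pv_sw _ (by decide) _,
      pv_sw _ (by decide) _]
  cases hL : decide ((s.toList.takeWhile (fun c => c != ' ')).length < s.toList.length)
  · simp [hL]
  · simp [pvCOMMANDS, pv_beq]
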